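-- pv_equiv track=rewrite | github.com/ajay007e/grind-and-code | leetcode/978/978.py | maxTurbulenceSize
-- ===== SOURCE A (Python) =====
-- from typing import List
--
-- def maxTurbulenceSize(arr: List[int]) -> int:
--     r, l, res, prev = 1, 0, 1, ""
--     while r < len(arr):
--         if arr[r] < arr[r - 1] and prev != "<":
--             res = max(res, r - l + 1)
--             r += 1
--             prev = "<"
--         elif arr[r] > arr[r - 1] and prev != ">":
--             res = max(res, r - l + 1)
--             r += 1
--             prev = ">"
--         else:
--             r = r + 1 if arr[r] == arr[r - 1] else r
--             l = r - 1
--             prev = ""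
--     return res
-- ===== SOURCE B (Python) =====
-- def maxTurbulenceSize(arr):
--     res = inc = dec = 1
--     for i in range(1, len(arr)):
--         if arr[i] > arr[i - 1]:
--             inc, dec = dec + 1, 1
--         elif arr[i] < arr[i - 1]:
--             inc, dec = 1, inc + 1
--         else:
--             inc = dec = 1
--         res = max(res, inc, dec)
--     return res
-- ===== Notes on version B (the rewrite author's own statement) =====
-- stated objective: simpler
-- what changed: Replaces A's two-pointer window with a left endpoint, a direction string and a stay-put reset branch by a single for-loop run-length DP keeping two accumulators inc/dec (longest turbulent run ending at i with an up/down last step).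
import Mathlib
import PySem

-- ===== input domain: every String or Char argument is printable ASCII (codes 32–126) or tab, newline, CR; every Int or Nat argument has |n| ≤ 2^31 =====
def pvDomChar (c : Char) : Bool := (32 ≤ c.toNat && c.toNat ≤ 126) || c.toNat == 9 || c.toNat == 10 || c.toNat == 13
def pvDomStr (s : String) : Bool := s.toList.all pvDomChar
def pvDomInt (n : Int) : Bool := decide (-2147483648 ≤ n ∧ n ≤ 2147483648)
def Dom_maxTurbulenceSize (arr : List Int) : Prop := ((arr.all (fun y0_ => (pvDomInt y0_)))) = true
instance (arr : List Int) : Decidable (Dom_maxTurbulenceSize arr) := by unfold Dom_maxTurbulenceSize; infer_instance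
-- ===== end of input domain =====

-- B replaces A's two-pointer window + direction-string state machine with a run-length DP
-- (inc/dec accumulators); same single pass, simpler state (objective: simpler).

-- ===== PORT A =====
-- A's while-loop. The Nat argument is a fuel guard for totality only: 2*len(arr)+1 steps
-- always suffice (each iteration either advances r, or resets prev to "" with r fixed, and
-- a reset is never followed by another reset at the same r), so the 0 case is never reached
-- from maxTurbulenceSize.
def pvLoopA (arr : List Int) : Nat → Int → Int → Int → String → Int
  | 0, _, _, res, _ => res
  | fuel + 1, r, l, res, prev =>
    if r < (arr.length : Int) then
      match PySem.List.pyGet? arr r, PySem.List.pyGet? arr (r - 1) with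
      | some b, some a =>
        if b < a ∧ prev ≠ "<" then
          pvLoopA arr fuel (r + 1) l (max res (r - l + 1)) "<"
        else if b > a ∧ prev ≠ ">" then
          pvLoopA arr fuel (r + 1) l (max res (r - l + 1)) ">"
        else
          if b = a then pvLoopA arr fuel (r + 1) r res ""
          else pvLoopA arr fuel r (r - 1) res ""
      | _, _ => res   -- unreachable: indices are always in range inside the loop
    else res

def maxTurbulenceSize (arr : List Int) : Int :=
  pvLoopA arr (2 * arr.length + 1) 1 0 1 ""

-- ===== PORT B =====
-- B's for-loop over i in range(1, len(arr)), as index recursion; the Nat argument is a fuel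
-- guard for totality only (len(arr) steps always suffice).
def pvLoopB (arr : List Int) : Nat → Int → Int → Int → Int → Int
  | 0, _, res, _, _ => res
  | fuel + 1, i, res, inc, dec =>
    if i < (arr.length : Int) then
      match PySem.List.pyGet? arr i, PySem.List.pyGet? arr (i - 1) with
      | some b, some a =>
        if a < b then pvLoopB arr fuel (i + 1) (max res (max (dec + 1) 1)) (dec + 1) 1
        else if b < a then pvLoopB arr fuel (i + 1) (max res (max 1 (inc + 1))) 1 (inc + 1)
        else pvLoopB arr fuel (i + 1) (max res 1) 1 1
      | _, _ => res   -- unreachable: indices are always in range inside the loop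
    else res

def maxTurbulenceSize_alt (arr : List Int) : Int :=
  pvLoopB arr arr.length 1 1 1 1

-- ===== PRECONDITION & SPEC =====
def Spec_maxTurbulenceSize (arr : List Int) (out : Int) : Prop := out = maxTurbulenceSize_alt arr
instance (arr : List Int) (out : Int) : Decidable (Spec_maxTurbulenceSize arr out) := by unfold Spec_maxTurbulenceSize; infer_instance

-- ===== CLAIM (what is proved, stated in full; the proofs are below) =====
def Claim_equal_maxTurbulenceSize : Prop := ∀ (arr : List Int), Dom_maxTurbulenceSize arr → Spec_maxTurbulenceSize arr (maxTurbulenceSize arr)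

-- ===== LEMMAS AND PROOFS =====

-- Correspondence between A's window state (r, l, prev) and B's run lengths (inc, dec)
-- at loop entry for index r.
def pvInv (r l inc dec : Int) (prev : String) : Prop :=
  (prev = "" ∧ inc = 1 ∧ dec = 1 ∧ l = r - 1)
  ∨ (prev = "<" ∧ inc = 1 ∧ dec = r - l ∧ 2 ≤ r - l)
  ∨ (prev = ">" ∧ dec = 1 ∧ inc = r - l ∧ 2 ≤ r - l)

lemma pvGet_some (arr : List Int) (r : Int) (h0 : 0 ≤ r) (h1 : r < (arr.length : Int)) :
    ∃ x, PySem.List.pyGet? arr r = some x := by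
  cases hx : PySem.List.pyGet? arr r with
  | some x => exact ⟨x, rfl⟩
  | none =>
    exfalso
    rw [PySem.List.pyGet?_eq_none_iff] at hx
    exact hx (by simp [PySem.Raise.InRange]; omega)

lemma pvLoopA_stop (arr : List Int) (fa : Nat) (r l res : Int) (prev : String)
    (h : ¬ r < (arr.length : Int)) : pvLoopA arr fa r l res prev = res := by
  cases fa <;> simp [pvLoopA, h]

lemma pvLoopB_stop (arr : List Int) (fb : Nat) (i res inc dec : Int)
    (h : ¬ i < (arr.length : Int)) : pvLoopB arr fb i res inc dec = res := by
  cases fb <;> simp [pvLoopB, h]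

lemma pvLoop_eq (arr : List Int) :
    ∀ (fa fb : Nat) (r l res inc dec : Int) (prev : String),
      2 * (((arr.length : Int) - r).toNat) + 1 ≤ fa →
      (((arr.length : Int) - r).toNat) ≤ fb →
      1 ≤ r → 1 ≤ res →
      pvInv r l inc dec prev →
      pvLoopA arr fa r l res prev = pvLoopB arr fb r res inc dec := by
  intro fa
  induction fa using Nat.strong_induction_on with
  | _ fa ih =>
    intro fb r l res inc dec prev hfa hfb hr hres hinv
    by_cases hlt : r < (arr.length : Int)
    · obtain ⟨b, hb⟩ := pvGet_some arr r (by omega) hlt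
      obtain ⟨a, ha⟩ := pvGet_some arr (r - 1) (by omega) (by omega)
      obtain ⟨fa', rfl⟩ : ∃ fa', fa = fa' + 1 := ⟨fa - 1, by omega⟩
      obtain ⟨fb', rfl⟩ : ∃ fb', fb = fb' + 1 := ⟨fb - 1, by omega⟩
      rw [pvLoopA, pvLoopB]
      simp only [hlt, if_true, hb, ha]
      rcases hinv with ⟨hp, hi, hd, hl⟩ | ⟨hp, hi, hd, hl⟩ | ⟨hp, hd, hi, hl⟩
      · -- prev = "", inc = dec = 1, l = r - 1
        subst hp hi hd hl
        rcases lt_trichotomy b a with hba | hba | hba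
        · rw [if_pos (⟨hba, by decide⟩ : b < a ∧ "" ≠ "<"),
              if_neg (show ¬ (a < b) by omega), if_pos hba,
              show r - (r - 1) + 1 = max 1 (1 + 1) by omega]
          exact ih fa' (by omega) fb' (r + 1) (r - 1)
            _ 1 (1 + 1) "<" (by omega) (by omega) (by omega) (by omega)
            (Or.inr (Or.inl ⟨rfl, rfl, by omega, by omega⟩))
        · subst hba
          rw [if_neg (fun h : b < b ∧ "" ≠ "<" => absurd h.1 (lt_irrefl b)),
              if_neg (fun h : b > b ∧ "" ≠ ">" => absurd h.1 (lt_irrefl b)),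
              if_pos rfl, if_neg (lt_irrefl b), if_neg (lt_irrefl b)]
          conv_lhs => rw [show res = max res 1 by omega]
          exact ih fa' (by omega) fb' (r + 1) r
            _ 1 1 "" (by omega) (by omega) (by omega) (by omega)
            (Or.inl ⟨rfl, rfl, rfl, by omega⟩)
        · rw [if_neg (fun h : b < a ∧ "" ≠ "<" => absurd h.1 (by omega)),
              if_pos (⟨hba, by decide⟩ : b > a ∧ "" ≠ ">"), if_pos hba,
              show r - (r - 1) + 1 = max (1 + 1) 1 by omega]
          exact ih fa' (by omega) fb' (r + 1) (r - 1)
            _ (1 + 1) 1 ">" (by omega) (by omega) (by omega) (by omega)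
            (Or.inr (Or.inr ⟨rfl, rfl, by omega, by omega⟩))
      · -- prev = "<", inc = 1, dec = r - l
        subst hp hi hd
        rcases lt_trichotomy b a with hba | hba | hba
        · -- A resets (r stays put), then extends downward on the next iteration
          rw [if_neg (fun h : b < a ∧ "<" ≠ "<" => h.2 rfl),
              if_neg (fun h : b > a ∧ "<" ≠ ">" => absurd h.1 (by omega)),
              if_neg (show ¬ (b = a) by omega),
              if_neg (show ¬ (a < b) by omega), if_pos hba]
          obtain ⟨fa'', rfl⟩ : ∃ fa'', fa' = fa'' + 1 := ⟨fa' - 1, by omega⟩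
          rw [pvLoopA]
          simp only [hlt, if_true, hb, ha]
          rw [if_pos (⟨hba, by decide⟩ : b < a ∧ "" ≠ "<"),
              show r - (r - 1) + 1 = max 1 (1 + 1) by omega]
          exact ih fa'' (by omega) fb' (r + 1) (r - 1)
            _ 1 (1 + 1) "<" (by omega) (by omega) (by omega) (by omega)
            (Or.inr (Or.inl ⟨rfl, rfl, by omega, by omega⟩))
        · subst hba
          rw [if_neg (fun h : b < b ∧ "<" ≠ "<" => absurd h.1 (lt_irrefl b)),
              if_neg (fun h : b > b ∧ "<" ≠ ">" => absurd h.1 (lt_irrefl b)),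
              if_pos rfl, if_neg (lt_irrefl b), if_neg (lt_irrefl b)]
          conv_lhs => rw [show res = max res 1 by omega]
          exact ih fa' (by omega) fb' (r + 1) r
            _ 1 1 "" (by omega) (by omega) (by omega) (by omega)
            (Or.inl ⟨rfl, rfl, rfl, by omega⟩)
        · rw [if_neg (fun h : b < a ∧ "<" ≠ "<" => absurd h.1 (by omega)),
              if_pos (⟨hba, by decide⟩ : b > a ∧ "<" ≠ ">"), if_pos hba,
              show max (r - l + 1) 1 = r - l + 1 by omega]
          exact ih fa' (by omega) fb' (r + 1) l
            _ (r - l + 1) 1 ">" (by omega) (by omega) (by omega) (by omega)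
            (Or.inr (Or.inr ⟨rfl, rfl, by omega, by omega⟩))
      · -- prev = ">", dec = 1, inc = r - l (mirror of the previous case)
        subst hp hi hd
        rcases lt_trichotomy b a with hba | hba | hba
        · rw [if_pos (⟨hba, by decide⟩ : b < a ∧ ">" ≠ "<"),
              if_neg (show ¬ (a < b) by omega), if_pos hba,
              show max 1 (r - l + 1) = r - l + 1 by omega]
          exact ih fa' (by omega) fb' (r + 1) l
            _ 1 (r - l + 1) "<" (by omega) (by omega) (by omega) (by omega)
            (Or.inr (Or.inl ⟨rfl, rfl, by omega, by omega⟩))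
        · subst hba
          rw [if_neg (fun h : b < b ∧ ">" ≠ "<" => absurd h.1 (lt_irrefl b)),
              if_neg (fun h : b > b ∧ ">" ≠ ">" => absurd h.1 (lt_irrefl b)),
              if_pos rfl, if_neg (lt_irrefl b), if_neg (lt_irrefl b)]
          conv_lhs => rw [show res = max res 1 by omega]
          exact ih fa' (by omega) fb' (r + 1) r
            _ 1 1 "" (by omega) (by omega) (by omega) (by omega)
            (Or.inl ⟨rfl, rfl, rfl, by omega⟩)
        · -- A resets (r stays put), then extends upward on the next iteration
          rw [if_neg (fun h : b < a ∧ ">" ≠ "<" => absurd h.1 (by omega)),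
              if_neg (fun h : b > a ∧ ">" ≠ ">" => h.2 rfl),
              if_neg (show ¬ (b = a) by omega),
              if_pos hba]
          obtain ⟨fa'', rfl⟩ : ∃ fa'', fa' = fa'' + 1 := ⟨fa' - 1, by omega⟩
          rw [pvLoopA]
          simp only [hlt, if_true, hb, ha]
          rw [if_neg (fun h : b < a ∧ "" ≠ "<" => absurd h.1 (by omega)),
              if_pos (⟨hba, by decide⟩ : b > a ∧ "" ≠ ">"),
              show r - (r - 1) + 1 = max (1 + 1) 1 by omega]
          exact ih fa'' (by omega) fb' (r + 1) (r - 1)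
            _ (1 + 1) 1 ">" (by omega) (by omega) (by omega) (by omega)
            (Or.inr (Or.inr ⟨rfl, rfl, by omega, by omega⟩))
    · rw [pvLoopA_stop arr _ _ _ _ _ hlt, pvLoopB_stop arr _ _ _ _ _ hlt]

-- ===== VERDICT (by name: the statement is the Claim_ definition above) =====
theorem maxTurbulenceSize_spec : Claim_equal_maxTurbulenceSize := by
  intro arr _
  unfold Spec_maxTurbulenceSize maxTurbulenceSize maxTurbulenceSize_alt
  exact pvLoop_eq arr (2 * arr.length + 1) arr.length 1 0 1 1 1 ""
    (by omega) (by omega) (by omega) (by omega)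
    (Or.inl ⟨rfl, rfl, rfl, by omega⟩)
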